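-- pv_equiv track=rewrite | github.com/xer0times/SQLi-Query-Tampering | tamper.py | overlongutf8
-- ===== SOURCE A (Python) =====
-- import string
--
-- def overlongutf8(payload, **kwargs):
--     """
--     Converts all (non-alphanum) characters in a given payload to overlong UTF8 (not processing already encoded) (e.g. ' -> %C0%A7)
--     Reference:
--         * https://www.acunetix.com/vulnerabilities/unicode-transformation-issues/
--         * https://www.thecodingforums.com/threads/newbie-question-about-character-encoding-what-does-0xc0-0x8a-have-in-common-with-0xe0-0x80-0x8a.170201/
--     >>> tamper('SELECT FIELD FROM TABLE WHERE 2>1')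
--     'SELECT%C0%A0FIELD%C0%A0FROM%C0%A0TABLE%C0%A0WHERE%C0%A02%C0%BE1'
--     """
--
--     retVal = payload
--
--     if payload:
--         retVal = ""
--         i = 0
--
--         while i < len(payload):
--             if payload[i] == '%' and (i < len(payload) - 2) and payload[i + 1:i + 2] in string.hexdigits and payload[i + 2:i + 3] in string.hexdigits:
--                 retVal += payload[i:i + 3]
--                 i += 3
--             else:
--                 if payload[i] not in (string.ascii_letters + string.digits):
--                     retVal += "%%%.2X%%%.2X" % (0xc0 + (ord(payload[i]) >> 6), 0x80 + (ord(payload[i]) & 0x3f))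
--                 else:
--                     retVal += payload[i]
--                 i += 1
--
--     return retVal
-- ===== SOURCE B (Python) =====
-- import re
--
-- _ESC = re.compile(r'%[0-9a-fA-F]{2}|[^a-zA-Z0-9]')
--
-- def _repl(m):
--     s = m.group(0)
--     if len(s) == 3:
--         return s
--     return "%%%.2X%%%.2X" % (0xc0 + (ord(s) >> 6), 0x80 + (ord(s) & 0x3f))
--
-- def overlongutf8(payload, **kwargs):
--     if not payload:
--         return payload
--     return _ESC.sub(_repl, payload)
-- ===== Notes on version B (the rewrite author's own statement) =====
-- stated objective: faster
-- what changed: A's index-arithmetic while-loop with slicing and quadratic string concatenation is replaced by a single regex substitution (escape alternative first, else a non-alphanumeric char) whose callback keeps existing percent-escapes verbatim and overlong-encodes other non-alphanumerics.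
import Mathlib
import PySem

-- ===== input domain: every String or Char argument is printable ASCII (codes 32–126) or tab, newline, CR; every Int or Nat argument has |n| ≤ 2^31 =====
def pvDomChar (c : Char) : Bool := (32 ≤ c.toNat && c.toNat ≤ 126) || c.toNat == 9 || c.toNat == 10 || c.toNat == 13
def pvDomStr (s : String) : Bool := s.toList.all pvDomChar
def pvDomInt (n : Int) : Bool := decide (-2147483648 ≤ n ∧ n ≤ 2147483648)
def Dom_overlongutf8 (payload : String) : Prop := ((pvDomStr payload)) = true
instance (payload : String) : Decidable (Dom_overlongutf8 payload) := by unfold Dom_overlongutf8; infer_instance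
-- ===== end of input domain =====

-- B replaces A's index/slice while-loop (quadratic string concatenation) by a single
-- leftmost-match regex substitution pass with a replacement callback; objective: faster (measured).

-- ===== PORT A =====
-- string.hexdigits and string.ascii_letters + string.digits
def pyHexdigits : List Char := "0123456789abcdefABCDEF".toList
def pyAlnum : List Char := "abcdefghijklmnopqrstuvwxyzABCDEFGHIJKLMNOPQRSTUVWXYZ0123456789".toList

-- "%.2X" % n : uppercase hex, width 2 — exact for 0 ≤ n < 256 (the only values used here)
def hexDigitU (n : Nat) : Char := if n < 10 then Char.ofNat (48 + n) else Char.ofNat (55 + n)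
def pct2X (n : Nat) : List Char := ['%', hexDigitU (n / 16), hexDigitU (n % 16)]
-- "%%%.2X%%%.2X" % (0xc0 + (ord(c) >> 6), 0x80 + (ord(c) & 0x3f))
def encOverlong (c : Char) : List Char :=
  pct2X (0xc0 + (c.toNat >>> 6)) ++ pct2X (0x80 + (c.toNat &&& 0x3f))

-- the while loop of A, index i over the characters, retVal accumulator
def aGo (cs : List Char) (i : Nat) (acc : List Char) : List Char :=
  if h : i < cs.length then
    if cs[i] = '%' ∧ (i : Int) < (cs.length : Int) - 2 ∧
        PySem.Chars.isIn (PySem.List.slice cs (some ((i : Int) + 1)) (some ((i : Int) + 2))) pyHexdigits = true ∧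
        PySem.Chars.isIn (PySem.List.slice cs (some ((i : Int) + 2)) (some ((i : Int) + 3))) pyHexdigits = true then
      aGo cs (i + 3) (acc ++ PySem.List.slice cs (some (i : Int)) (some ((i : Int) + 3)))
    else if ¬ (PySem.Chars.isIn [cs[i]] pyAlnum = true) then
      aGo cs (i + 1) (acc ++ encOverlong cs[i])
    else
      aGo cs (i + 1) (acc ++ [cs[i]])
  else acc
termination_by cs.length - i

def overlongutf8 (payload : String) : String :=
  if payload.toList.isEmpty then payload
  else String.ofList (aGo payload.toList 0 [])

-- ===== PORT B =====
-- character classes of the regex, as range tests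
def isHexCh (c : Char) : Bool := ('0' ≤ c && c ≤ '9') || ('a' ≤ c && c ≤ 'f') || ('A' ≤ c && c ≤ 'F')
def isAlnumCh (c : Char) : Bool := ('0' ≤ c && c ≤ '9') || ('a' ≤ c && c ≤ 'z') || ('A' ≤ c && c ≤ 'Z')

-- hand port of re.sub(r'%[0-9a-fA-F]{2}|[^a-zA-Z0-9]', _repl, payload): left-to-right scan,
-- at each position try the first alternative ('%' + two hex digits, kept verbatim), then the
-- second (a non-alphanumeric character, replaced by its overlong encoding), else copy the char.
-- Exact for this pattern: both alternatives anchor at the scan position and cannot overlap a skipped char.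
def bGo : List Char → List Char
  | [] => []
  | c :: rest =>
    if c = '%' then
      match rest with
      | h1 :: h2 :: rest' =>
        if isHexCh h1 && isHexCh h2 then '%' :: h1 :: h2 :: bGo rest'
        else encOverlong '%' ++ bGo (h1 :: h2 :: rest')
      | [h1] => encOverlong '%' ++ bGo [h1]
      | [] => encOverlong '%' ++ bGo []
    else if isAlnumCh c then c :: bGo rest
    else encOverlong c ++ bGo rest

def overlongutf8_alt (payload : String) : String :=
  if payload.toList.isEmpty then payload
  else String.ofList (bGo payload.toList)

-- ===== PRECONDITION & SPEC =====
def Spec_overlongutf8 (payload : String) (out : String) : Prop := out = overlongutf8_alt payload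
instance (payload : String) (out : String) : Decidable (Spec_overlongutf8 payload out) := by unfold Spec_overlongutf8; infer_instance

-- ===== CLAIM (what is proved, stated in full; the proofs are below) =====
def Claim_equal_overlongutf8 : Prop := ∀ (payload : String), Dom_overlongutf8 payload → Spec_overlongutf8 payload (overlongutf8 payload)

-- ===== LEMMAS AND PROOFS =====

-- enumeration principle for ASCII characters
theorem char_ascii_enum (P : Char → Bool)
    (hall : (List.range 128).all (fun n => P (Char.ofNat n)) = true)
    (c : Char) (h : c.toNat < 128) : P c = true := by
  have := List.all_eq_true.mp hall (c.toNat) (List.mem_range.mpr h)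
  simpa [Char.ofNat_toNat] using this

theorem hex_bridge (c : Char) (h : c.toNat < 128) :
    PySem.Chars.isIn [c] pyHexdigits = isHexCh c := by
  have := char_ascii_enum (fun c => PySem.Chars.isIn [c] pyHexdigits == isHexCh c) (by decide) c h
  simpa using this

theorem alnum_bridge (c : Char) (h : c.toNat < 128) :
    PySem.Chars.isIn [c] pyAlnum = isAlnumCh c := by
  have := char_ascii_enum (fun c => PySem.Chars.isIn [c] pyAlnum == isAlnumCh c) (by decide) c h
  simpa using this

theorem dom_lt_128 (c : Char) (h : pvDomChar c = true) : c.toNat < 128 := by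
  simp [pvDomChar] at h; omega

-- one-character slices of A are the singleton of the indexed character
theorem slice_one (cs : List Char) (i : Nat) (h : i < cs.length) :
    PySem.List.slice cs (some ((i : Int))) (some ((i : Int) + 1)) = [cs[i]] := by
  rw [show ((i:Int)+1) = ((i+1:Nat):Int) by push_cast; ring, PySem.List.slice_natCast,
    Nat.add_sub_cancel_left, List.drop_eq_getElem_cons h]
  rfl

theorem slice_one' (cs : List Char) (i k : Nat) (h : i + k < cs.length) :
    PySem.List.slice cs (some ((i : Int) + (k : Int))) (some ((i : Int) + (k : Int) + 1)) = [cs[i+k]] := by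
  have := slice_one cs (i+k) h
  rw [show ((i+k:Nat):Int) = (i:Int)+(k:Int) by push_cast; ring] at this
  exact this

theorem slice_three (cs : List Char) (i : Nat) (h : i + 2 < cs.length) :
    PySem.List.slice cs (some (i : Int)) (some ((i : Int) + 3)) = [cs[i], cs[i+1], cs[i+2]] := by
  rw [show ((i:Int)+3) = ((i+3:Nat):Int) by push_cast; ring, PySem.List.slice_natCast,
    Nat.add_sub_cancel_left,
    List.drop_eq_getElem_cons (show i < cs.length by omega),
    List.drop_eq_getElem_cons (show i+1 < cs.length by omega),
    List.drop_eq_getElem_cons (show i+2 < cs.length by omega)]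
  rfl

-- evaluation rules for bGo on the three head shapes
theorem bGo_cons (c : Char) (rest : List Char) (hc : c ≠ '%') :
    bGo (c :: rest) = if isAlnumCh c then c :: bGo rest else encOverlong c ++ bGo rest := by
  rw [bGo.eq_def]; simp [hc]

theorem bGo_pct3 (h1 h2 : Char) (rest : List Char) :
    bGo ('%' :: h1 :: h2 :: rest) =
      if isHexCh h1 && isHexCh h2 then '%' :: h1 :: h2 :: bGo rest
      else encOverlong '%' ++ bGo (h1 :: h2 :: rest) := rfl

theorem bGo_pct1 (a : Char) : bGo ['%', a] = encOverlong '%' ++ bGo [a] := rfl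

theorem bGo_pct0 : bGo ['%'] = encOverlong '%' := by decide

theorem aGo_eq_bGo (cs : List Char) (hdom : ∀ c ∈ cs, pvDomChar c = true) :
    ∀ n i acc, cs.length - i ≤ n → aGo cs i acc = acc ++ bGo (cs.drop i) := by
  have hx : ∀ (j : Nat) (h : j < cs.length), PySem.Chars.isIn [cs[j]] pyHexdigits = isHexCh cs[j] :=
    fun j h => hex_bridge _ (dom_lt_128 _ (hdom _ (List.getElem_mem h)))
  have ha : ∀ (j : Nat) (h : j < cs.length), PySem.Chars.isIn [cs[j]] pyAlnum = isAlnumCh cs[j] :=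
    fun j h => alnum_bridge _ (dom_lt_128 _ (hdom _ (List.getElem_mem h)))
  intro n
  induction n with
  | zero =>
    intro i acc h
    rw [aGo, dif_neg (by omega), List.drop_eq_nil_of_le (by omega)]
    simp [bGo]
  | succ n ih =>
    intro i acc h
    by_cases hi : i < cs.length
    · have hdrop : cs.drop i = cs[i] :: cs.drop (i+1) := List.drop_eq_getElem_cons hi
      rw [aGo, dif_pos hi]
      by_cases hpc : cs[i] = '%'
      · -- a '%' at position i
        have hnal : ¬ (PySem.Chars.isIn [cs[i]] pyAlnum = true) := by
          rw [ha i hi, hpc]; decide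
        by_cases hlen : i + 2 < cs.length
        · have hd1 : cs.drop (i+1) = cs[i+1] :: cs.drop (i+2) := List.drop_eq_getElem_cons (by omega)
          have hd2 : cs.drop (i+2) = cs[i+2] :: cs.drop (i+3) := List.drop_eq_getElem_cons (by omega)
          have hs1 : PySem.List.slice cs (some ((i:Int)+1)) (some ((i:Int)+2)) = [cs[i+1]] := by
            have := slice_one' cs i 1 (by omega)
            norm_num at this ⊢; exact this
          have hs2 : PySem.List.slice cs (some ((i:Int)+2)) (some ((i:Int)+3)) = [cs[i+2]] := by
            have := slice_one' cs i 2 (by omega)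
            norm_num at this ⊢; exact this
          have hcnd : (cs[i] = '%' ∧ (i : Int) < (cs.length : Int) - 2 ∧
              PySem.Chars.isIn (PySem.List.slice cs (some ((i : Int) + 1)) (some ((i : Int) + 2))) pyHexdigits = true ∧
              PySem.Chars.isIn (PySem.List.slice cs (some ((i : Int) + 2)) (some ((i : Int) + 3))) pyHexdigits = true)
              ↔ (isHexCh cs[i+1] = true ∧ isHexCh cs[i+2] = true) := by
            rw [hs1, hs2, hx (i+1) (by omega), hx (i+2) (by omega)]
            constructor
            · rintro ⟨-, -, q1, q2⟩; exact ⟨q1, q2⟩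
            · rintro ⟨q1, q2⟩; exact ⟨hpc, by omega, q1, q2⟩
          by_cases hh : isHexCh cs[i+1] = true ∧ isHexCh cs[i+2] = true
          · rw [if_pos (hcnd.mpr hh), ih (i+3) _ (by omega), slice_three cs i hlen,
              hdrop, hd1, hd2, hpc, bGo_pct3, if_pos (by rw [hh.1, hh.2]; rfl)]
            simp
          · rw [if_neg (fun q => hh (hcnd.mp q)), if_pos hnal, ih (i+1) _ (by omega),
              hdrop, hd1, hd2, hpc, bGo_pct3,
              if_neg (by simp only [Bool.and_eq_true]; exact hh)]
            simp
        · -- fewer than two characters after the '%'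
          rw [if_neg (by rintro ⟨-, q, -⟩; omega), if_pos hnal, ih (i+1) _ (by omega), hdrop, hpc]
          have hlen1 : (cs.drop (i+1)).length ≤ 1 := by simp; omega
          match hr : cs.drop (i+1) with
          | [] => rw [bGo_pct0]; simp [show bGo [] = [] from rfl]
          | [a] => rw [bGo_pct1]; simp
          | a :: b :: t => rw [hr] at hlen1; simp at hlen1
      · -- not a '%'
        rw [if_neg (fun q => hpc q.1), hdrop, bGo_cons _ _ hpc]
        by_cases hal : isAlnumCh cs[i] = true
        · rw [if_neg (fun hc => hc (by rw [ha i hi]; exact hal)), if_pos hal,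
            ih (i+1) _ (by omega)]
          simp
        · rw [if_pos (by rw [ha i hi]; exact hal), if_neg hal, ih (i+1) _ (by omega)]
          simp
    · rw [aGo, dif_neg hi, List.drop_eq_nil_of_le (by omega)]
      simp [bGo]

theorem overlongutf8_spec : Claim_equal_overlongutf8 := by
  intro payload hdom
  unfold Spec_overlongutf8 overlongutf8 overlongutf8_alt
  by_cases he : payload.toList.isEmpty
  · simp [he]
  · simp only [he]
    have hdom' : ∀ c ∈ payload.toList, pvDomChar c = true := by
      have := hdom; simp [Dom_overlongutf8, pvDomStr, List.all_eq_true] at this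
      exact this
    rw [aGo_eq_bGo payload.toList hdom' payload.toList.length 0 [] (by omega)]
    simp
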